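-- pv_equiv track=rewrite | github.com/sandeepkumar8713/pythonapps | 13_bit_magic/12_multiply_without_operator.py | russianPeasant
-- ===== SOURCE A (Python) =====
-- def makeSecondSmaller(a,b):
--     if a > b:
--         return a, b
--     else:
--         return b, a
--
-- def russianPeasant(a, b):
--     a, b = makeSecondSmaller(a, b)
--     res = 0
--
--     while b > 0:
--         if b & 1:
--             res = res + a
--
--         a <<= 1
--         b >>= 1
--
--     return res
-- ===== SOURCE B (Python) =====
-- def _mul(a, b):
--     # recursive russian-peasant core: assumes nothing, returns 0 once b <= 0
--     if b <= 0:
--         return 0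
--     return (a if b & 1 else 0) + _mul(a << 1, b >> 1)
--
-- def russianPeasant(a, b):
--     a, b = (a, b) if a > b else (b, a)
--     return _mul(a, b)
-- ===== Notes on version B (the rewrite author's own statement) =====
-- stated objective: alternative
-- what changed: Replaced A's flat while-loop with mutable (a,b,res) state by a top-level swap plus a recursive russian-peasant core that returns the sum directly (base case b <= 0).
import Mathlib
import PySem

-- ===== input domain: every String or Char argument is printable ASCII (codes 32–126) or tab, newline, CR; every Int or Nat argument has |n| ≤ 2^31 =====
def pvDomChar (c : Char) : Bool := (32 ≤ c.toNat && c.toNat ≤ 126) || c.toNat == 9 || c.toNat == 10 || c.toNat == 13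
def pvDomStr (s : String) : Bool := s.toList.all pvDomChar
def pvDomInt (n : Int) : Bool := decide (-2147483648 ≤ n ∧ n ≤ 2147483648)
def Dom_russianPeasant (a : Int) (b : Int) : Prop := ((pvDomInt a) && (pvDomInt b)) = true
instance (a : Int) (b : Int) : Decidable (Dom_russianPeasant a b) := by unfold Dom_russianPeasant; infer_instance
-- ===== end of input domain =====

-- B replaces A's flat while-loop with a one-time swap plus a recursive russian-peasant core (same cost); objective: alternative decomposition.
-- ===== PORT A =====
def makeSecondSmaller (a : Int) (b : Int) : Int × Int :=
  if a > b then (a, b) else (b, a)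

-- the while-loop of A, state (a, b, res)
def rpLoopA (a b res : Int) : Int :=
  if _h : b > 0 then
    rpLoopA (a <<< (1 : Nat)) (b >>> (1 : Nat)) (if Int.land b 1 ≠ 0 then res + a else res)
  else res
termination_by b.toNat
decreasing_by simp only [Int.shiftRight_eq_div_pow, pow_one]; omega

def russianPeasant (a : Int) (b : Int) : Int :=
  let p := makeSecondSmaller a b
  rpLoopA p.1 p.2 0

-- ===== PORT B =====
-- recursive core of Source B's _mul
def rpMul (a b : Int) : Int :=
  if b ≤ 0 then 0
  else (if Int.land b 1 ≠ 0 then a else 0) + rpMul (a <<< (1 : Nat)) (b >>> (1 : Nat))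
termination_by b.toNat
decreasing_by simp only [Int.shiftRight_eq_div_pow, pow_one]; omega

def russianPeasant_alt (a : Int) (b : Int) : Int :=
  let p := if a > b then (a, b) else (b, a)
  rpMul p.1 p.2

-- ===== PRECONDITION & SPEC =====
def Spec_russianPeasant (a : Int) (b : Int) (out : Int) : Prop := out = russianPeasant_alt a b
instance (a : Int) (b : Int) (out : Int) : Decidable (Spec_russianPeasant a b out) := by unfold Spec_russianPeasant; infer_instance

-- ===== CLAIM (what is proved, stated in full; the proofs are below) =====
def Claim_equal_russianPeasant : Prop := ∀ (a : Int) (b : Int), Dom_russianPeasant a b → Spec_russianPeasant a b (russianPeasant a b)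

-- ===== LEMMAS AND PROOFS =====

-- ===== VERDICT (by name: the statement is the Claim_ definition above) =====
theorem rpLoopA_eq_rpMul (a b res : Int) : rpLoopA a b res = res + rpMul a b := by
  by_cases h : b > 0
  · rw [rpLoopA, rpMul]
    simp only [dif_pos h, if_neg (by omega : ¬ b ≤ 0)]
    rw [rpLoopA_eq_rpMul]
    split_ifs <;> ring
  · rw [rpLoopA, rpMul]
    simp only [dif_neg h, if_pos (by omega : b ≤ 0), add_zero]
termination_by b.toNat
decreasing_by simp only [Int.shiftRight_eq_div_pow, pow_one]; omega

theorem russianPeasant_spec : Claim_equal_russianPeasant := by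
  intro a b _
  unfold Spec_russianPeasant russianPeasant russianPeasant_alt makeSecondSmaller
  simp only [rpLoopA_eq_rpMul, zero_add]
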